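-- pv_equiv track=rewrite | github.com/MengerWen/FMA4200-Financial-Data-Analysis | Final Project/src/fma4200_project/univariate_modeling.py | candidate_orders
-- ===== SOURCE A (Python) =====
-- MAX_AR_ORDER = 2
--
-- MAX_MA_ORDER = 2
--
-- def candidate_orders(d_candidates: list[int]) -> list[tuple[int, int, int]]:
--     orders: list[tuple[int, int, int]] = []
--     for d in d_candidates:
--         for p in range(MAX_AR_ORDER + 1):
--             for q in range(MAX_MA_ORDER + 1):
--                 if p == 0 and q == 0 and d == 0:
--                     orders.append((p, d, q))
--                 elif p + q > 0:
--                     orders.append((p, d, q))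
--     seen: set[tuple[int, int, int]] = set()
--     unique_orders: list[tuple[int, int, int]] = []
--     for order in orders:
--         if order not in seen:
--             unique_orders.append(order)
--             seen.add(order)
--     return unique_orders
-- ===== SOURCE B (Python) =====
-- MAX_AR_ORDER = 2
--
-- MAX_MA_ORDER = 2
--
-- def candidate_orders(d_candidates: list[int]) -> list[tuple[int, int, int]]:
--     out: list[tuple[int, int, int]] = []
--     for d in dict.fromkeys(d_candidates):
--         if d == 0:
--             out.append((0, d, 0))
--         for p in range(MAX_AR_ORDER + 1):
--             for q in range(MAX_MA_ORDER + 1):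
--                 if p + q > 0:
--                     out.append((p, d, q))
--     return out
-- ===== Notes on version B (the rewrite author's own statement) =====
-- stated objective: simpler
-- what changed: B deduplicates the d-values first (dict.fromkeys) and emits each d's fixed (p,q) block directly in one pass, instead of A's generate-all list followed by a second tuple-level seen-set dedup pass.
import Mathlib
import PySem

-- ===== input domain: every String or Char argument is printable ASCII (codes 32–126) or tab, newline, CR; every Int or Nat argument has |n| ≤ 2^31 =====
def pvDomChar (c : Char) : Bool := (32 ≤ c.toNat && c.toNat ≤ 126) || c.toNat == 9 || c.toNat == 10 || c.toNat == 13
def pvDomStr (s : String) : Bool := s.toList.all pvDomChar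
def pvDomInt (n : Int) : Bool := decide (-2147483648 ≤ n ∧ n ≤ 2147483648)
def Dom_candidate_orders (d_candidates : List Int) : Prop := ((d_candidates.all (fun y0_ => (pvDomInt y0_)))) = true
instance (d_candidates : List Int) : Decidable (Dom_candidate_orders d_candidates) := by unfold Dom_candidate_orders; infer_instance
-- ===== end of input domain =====

-- B restructures A's generate-all-then-dedup into one pass over the deduplicated d-values,
-- emitting each d's fixed (p,q) block directly (objective: simpler; return value identical).


-- ===== PORT A =====
-- A-side helper: the body of A's second loop ('if order not in seen: append; seen.add')
def pvDedupStep (st : PySem.Set (Int × Int × Int) × List (Int × Int × Int))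
    (order : Int × Int × Int) : PySem.Set (Int × Int × Int) × List (Int × Int × Int) :=
  if ¬ (PySem.Set.contains st.1 order = true) then (PySem.Set.add st.1 order, st.2 ++ [order]) else st

def candidate_orders (d_candidates : List Int) : List (Int × Int × Int) :=
  let orders : List (Int × Int × Int) := d_candidates.foldl (fun acc d =>
    (PySem.List.pyRange 0 (2 + 1) 1).foldl (fun acc p =>
      (PySem.List.pyRange 0 (2 + 1) 1).foldl (fun acc q =>
        if p = 0 ∧ q = 0 ∧ d = 0 then acc ++ [(p, d, q)]
        else if p + q > 0 then acc ++ [(p, d, q)]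
        else acc) acc) acc) []
  (orders.foldl pvDedupStep (PySem.Set.empty, [])).2

-- ===== PORT B =====
def candidate_orders_alt (d_candidates : List Int) : List (Int × Int × Int) :=
  (PySem.List.dedup d_candidates).foldl (fun out d =>
    let out := if d = 0 then out ++ [(0, d, 0)] else out
    (PySem.List.pyRange 0 (2 + 1) 1).foldl (fun out p =>
      (PySem.List.pyRange 0 (2 + 1) 1).foldl (fun out q =>
        if p + q > 0 then out ++ [(p, d, q)] else out) out) out) []

-- ===== PRECONDITION & SPEC =====
def Spec_candidate_orders (d_candidates : List Int) (out : List (Int × Int × Int)) : Prop := out = candidate_orders_alt d_candidates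
instance (d_candidates : List Int) (out : List (Int × Int × Int)) : Decidable (Spec_candidate_orders d_candidates out) := by unfold Spec_candidate_orders; infer_instance

-- ===== CLAIM (what is proved, stated in full; the proofs are below) =====
def Claim_equal_candidate_orders : Prop := ∀ (d_candidates : List Int), Dom_candidate_orders d_candidates → Spec_candidate_orders d_candidates (candidate_orders d_candidates)

-- ===== LEMMAS AND PROOFS =====

-- the tuples either program emits for one value of d, in emission order
def pvBlock (d : Int) : List (Int × Int × Int) :=
  (if d = 0 then [((0:Int), d, (0:Int))] else []) ++
  [(0, d, 1), (0, d, 2), (1, d, 0), (1, d, 1), (1, d, 2), (2, d, 0), (2, d, 1), (2, d, 2)]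

lemma pyRange_three : PySem.List.pyRange 0 (2 + 1) 1 = [0, 1, 2] := by decide

lemma innerA_eq (acc : List (Int × Int × Int)) (d : Int) :
    (PySem.List.pyRange 0 (2 + 1) 1).foldl (fun acc p =>
      (PySem.List.pyRange 0 (2 + 1) 1).foldl (fun acc q =>
        if p = 0 ∧ q = 0 ∧ d = 0 then acc ++ [(p, d, q)]
        else if p + q > 0 then acc ++ [(p, d, q)]
        else acc) acc) acc = acc ++ pvBlock d := by
  rw [pyRange_three]
  by_cases hd : d = 0 <;> simp [List.foldl, pvBlock, hd]

lemma innerB_eq (out : List (Int × Int × Int)) (d : Int) :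
    (let out := if d = 0 then out ++ [((0:Int), d, (0:Int))] else out
     (PySem.List.pyRange 0 (2 + 1) 1).foldl (fun out p =>
       (PySem.List.pyRange 0 (2 + 1) 1).foldl (fun out q =>
         if p + q > 0 then out ++ [(p, d, q)] else out) out) out) = out ++ pvBlock d := by
  rw [pyRange_three]
  by_cases hd : d = 0 <;> simp [List.foldl, pvBlock, hd]

lemma block_middle {t : Int × Int × Int} {d : Int} (h : t ∈ pvBlock d) : t.2.1 = d := by
  by_cases hd : d = 0 <;> simp [pvBlock, hd] at h <;> aesop

lemma block_nodup (d : Int) : (pvBlock d).Nodup := by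
  by_cases hd : d = 0 <;> simp [pvBlock, hd]

-- dedup relative to an already-seen list
def pvMyDedup (done : List Int) : List Int → List Int
  | [] => []
  | d :: ds => if d ∈ done then pvMyDedup done ds else d :: pvMyDedup (d :: done) ds

lemma myDedup_congr {done done' : List Int} (h : ∀ x, x ∈ done ↔ x ∈ done') :
    ∀ ds, pvMyDedup done ds = pvMyDedup done' ds := by
  intro ds
  induction ds generalizing done done' with
  | nil => rfl
  | cons d ds ih =>
    by_cases hd : d ∈ done
    · simp [pvMyDedup, hd, (h d).mp hd, ih h]
    · have hd' : d ∉ done' := fun hx => hd ((h d).mpr hx)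
      simp [pvMyDedup, hd, hd']
      exact ih (fun x => by simp [List.mem_cons, h x])

lemma foldl_add_eq_myDedup : ∀ (ds : List Int) (s : PySem.Set Int),
    ds.foldl PySem.Set.add s = s ++ pvMyDedup s ds := by
  intro ds
  induction ds with
  | nil => intro s; simp [pvMyDedup]
  | cons d ds ih =>
    intro s
    by_cases hd : d ∈ s
    · simp [List.foldl, pvMyDedup, hd, ih s]
    · simp only [List.foldl, PySem.Set.add_of_not_mem hd, ih (s ++ [d])]
      rw [myDedup_congr (done := s ++ [d]) (done' := d :: s) (by intro x; simp [or_comm])]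
      simp [pvMyDedup, hd]

lemma dedup_eq_myDedup (ds : List Int) : PySem.List.dedup ds = pvMyDedup [] ds := by
  have h := foldl_add_eq_myDedup ds []
  simpa [PySem.Set.ofList_eq_foldl] using h

lemma fold_seen : ∀ (L : List (Int × Int × Int)) (s : PySem.Set (Int × Int × Int)) acc,
    (∀ t ∈ L, t ∈ s) → L.foldl pvDedupStep (s, acc) = (s, acc) := by
  intro L
  induction L with
  | nil => intro s acc _; rfl
  | cons t L ih =>
    intro s acc h
    have ht : PySem.Set.contains s t = true := (PySem.Set.contains_iff s t).mpr (h t (by simp))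
    simp only [List.foldl, pvDedupStep, ht, not_true, if_false]
    exact ih s acc (fun u hu => h u (by simp [hu]))

lemma fold_fresh : ∀ (L : List (Int × Int × Int)) (s : PySem.Set (Int × Int × Int)) acc,
    L.Nodup → (∀ t ∈ L, t ∉ s) → L.foldl pvDedupStep (s, acc) = (s ++ L, acc ++ L) := by
  intro L
  induction L with
  | nil => intro s acc _ _; simp
  | cons t L ih =>
    intro s acc hnd h
    have ht : t ∉ s := h t (by simp)
    have hc : PySem.Set.contains s t = false := by
      by_contra hx
      exact ht ((PySem.Set.contains_iff s t).mp (by revert hx; cases PySem.Set.contains s t <;> simp))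
    simp only [List.foldl, pvDedupStep, hc]
    simp only [Bool.false_eq_true, not_false_iff, if_pos, PySem.Set.add_of_not_mem ht]
    have h' : ∀ u ∈ L, u ∉ s ++ [t] := by
      intro u hu
      simp only [List.mem_append, List.mem_singleton]
      rintro (hx | rfl)
      · exact h u (by simp [hu]) hx
      · exact (List.nodup_cons.mp hnd).1 hu
    rw [ih (s ++ [t]) (acc ++ [t]) (List.nodup_cons.mp hnd).2 h']
    simp

lemma fold_blocks : ∀ (ds done : List Int) (s : PySem.Set (Int × Int × Int)) acc,
    (∀ t, t ∈ s ↔ ∃ d ∈ done, t ∈ pvBlock d) →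
    (ds.flatMap pvBlock).foldl pvDedupStep (s, acc) =
      (s ++ (pvMyDedup done ds).flatMap pvBlock, acc ++ (pvMyDedup done ds).flatMap pvBlock) := by
  intro ds
  induction ds with
  | nil => intro done s acc _; simp [pvMyDedup]
  | cons d ds ih =>
    intro done s acc hseen
    rw [List.flatMap_cons, List.foldl_append]
    by_cases hd : d ∈ done
    · have hall : ∀ t ∈ pvBlock d, t ∈ s := fun t ht => (hseen t).mpr ⟨d, hd, ht⟩
      rw [fold_seen _ s acc hall, ih done s acc hseen]
      simp [pvMyDedup, hd]
    · have hfresh : ∀ t ∈ pvBlock d, t ∉ s := by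
        intro t ht hts
        obtain ⟨d', hd', ht'⟩ := (hseen t).mp hts
        have : d = d' := by rw [← block_middle ht, block_middle ht']
        exact hd (this ▸ hd')
      rw [fold_fresh _ s acc (block_nodup d) hfresh]
      have hseen' : ∀ t, t ∈ s ++ pvBlock d ↔ ∃ d' ∈ d :: done, t ∈ pvBlock d' := by
        intro t
        simp only [List.mem_append, List.mem_cons]
        constructor
        · rintro (hts | htb)
          · obtain ⟨d', hd', ht'⟩ := (hseen t).mp hts
            exact ⟨d', Or.inr hd', ht'⟩
          · exact ⟨d, Or.inl rfl, htb⟩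
        · rintro ⟨d', (rfl | hd'), ht'⟩
          · exact Or.inr ht'
          · exact Or.inl ((hseen t).mpr ⟨d', hd', ht'⟩)
      rw [ih (d :: done) (s ++ pvBlock d) (acc ++ pvBlock d) hseen']
      simp [pvMyDedup, hd, List.append_assoc]

lemma ordersA_eq (ds : List Int) :
    ds.foldl (fun acc d =>
      (PySem.List.pyRange 0 (2 + 1) 1).foldl (fun acc p =>
        (PySem.List.pyRange 0 (2 + 1) 1).foldl (fun acc q =>
          if p = 0 ∧ q = 0 ∧ d = 0 then acc ++ [(p, d, q)]
          else if p + q > 0 then acc ++ [(p, d, q)]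
          else acc) acc) acc) [] = ds.flatMap pvBlock := by
  have hf : (fun (acc : List (Int × Int × Int)) (d : Int) =>
      (PySem.List.pyRange 0 (2 + 1) 1).foldl (fun acc p =>
        (PySem.List.pyRange 0 (2 + 1) 1).foldl (fun acc q =>
          if p = 0 ∧ q = 0 ∧ d = 0 then acc ++ [(p, d, q)]
          else if p + q > 0 then acc ++ [(p, d, q)]
          else acc) acc) acc) = fun acc d => acc ++ pvBlock d := by
    funext acc d; exact innerA_eq acc d
  rw [hf, PySem.List.foldl_append_eq_flatMap]
  simp

lemma alt_eq (ds : List Int) :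
    candidate_orders_alt ds = (pvMyDedup [] ds).flatMap pvBlock := by
  unfold candidate_orders_alt
  have hf : (fun (out : List (Int × Int × Int)) (d : Int) =>
      let out := if d = 0 then out ++ [((0:Int), d, (0:Int))] else out
      (PySem.List.pyRange 0 (2 + 1) 1).foldl (fun out p =>
        (PySem.List.pyRange 0 (2 + 1) 1).foldl (fun out q =>
          if p + q > 0 then out ++ [(p, d, q)] else out) out) out) =
      fun out d => out ++ pvBlock d := by
    funext out d; exact innerB_eq out d
  rw [hf, PySem.List.foldl_append_eq_flatMap, dedup_eq_myDedup]
  simp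

-- ===== VERDICT (by name: the statement is the Claim_ definition above) =====
theorem candidate_orders_spec : Claim_equal_candidate_orders := by
  intro ds _
  unfold Spec_candidate_orders candidate_orders
  rw [ordersA_eq, alt_eq]
  show (List.foldl pvDedupStep (PySem.Set.empty, []) (ds.flatMap pvBlock)).2 =
    (pvMyDedup [] ds).flatMap pvBlock
  rw [fold_blocks ds [] PySem.Set.empty [] (by simp [PySem.Set.empty])]
  simp
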